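-- pv_equiv track=rewrite | github.com/sungsikyang92/AlgoS | BAEKJOON/Brute_Force_Atk/3085.py | check
-- ===== SOURCE A (Python) =====
-- def check(x, n):
--     result = 1
--     for i in range(n):
--         cnt = 1
--         for j in range(1, n):
--             if x[i][j] == x[i][j - 1]:
--                 cnt += 1
--             else:
--                 cnt = 1
--             if result < cnt:
--                 result = cnt
--         cnt = 1
--         for j in range(1, n):
--             if x[j][i] == x[j - 1][i]:
--                 cnt += 1
--             else:
--                 cnt = 1
--             if result < cnt:
--                 result = cnt
--     return result
-- ===== SOURCE B (Python) =====
-- def check(x, n):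
--     result = 1
--     col_run = [1] * n
--     for i in range(n):
--         if i > 0:
--             col_run = [col_run[j] + 1 if x[i][j] == x[i - 1][j] else 1
--                        for j in range(n)]
--             for v in col_run:
--                 if v > result:
--                     result = v
--         row_run = 1
--         for j in range(1, n):
--             row_run = row_run + 1 if x[i][j] == x[i][j - 1] else 1
--             if row_run > result:
--                 result = row_run
--     return result
-- ===== Notes on version B (the rewrite author's own statement) =====
-- stated objective: alternative
-- what changed: A scans each row and each full column in separate inner passes; B makes a single top-down row pass that carries the vertical run lengths of all columns in a col_run array rebuilt per row, so columns are never traversed separately.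
import Mathlib
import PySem

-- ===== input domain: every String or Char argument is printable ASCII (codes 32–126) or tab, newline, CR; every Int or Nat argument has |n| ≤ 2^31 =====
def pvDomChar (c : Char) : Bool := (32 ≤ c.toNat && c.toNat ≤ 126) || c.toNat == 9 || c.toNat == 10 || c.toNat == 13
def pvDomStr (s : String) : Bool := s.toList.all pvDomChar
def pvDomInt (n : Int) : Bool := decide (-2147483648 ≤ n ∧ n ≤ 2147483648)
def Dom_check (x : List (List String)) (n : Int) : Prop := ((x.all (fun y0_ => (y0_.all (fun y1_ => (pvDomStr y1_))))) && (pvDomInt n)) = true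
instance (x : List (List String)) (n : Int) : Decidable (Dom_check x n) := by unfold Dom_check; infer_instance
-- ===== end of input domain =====

-- B changes A's 2n separate 1-D scans (each row, then each full column) into a single
-- top-down pass that carries every column's current vertical run length in an array;
-- equivalence of the return value is proved on all inputs where the Python A returns.

-- ===== PORT A =====
-- x[i][j] with both indices in range under Pre_check; pyGetD is exact there
def cellGet (x : List (List String)) (i j : Int) : String :=
  PySem.List.pyGetD (PySem.List.pyGetD x i []) j ""

-- one step of A's inner `for j in range(1, n)` scan (cnt, result) — used for rows and columns
def rowStepA (f : Int → String) (p : Int × Int) (j : Int) : Int × Int :=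
  let cnt := if f j = f (j - 1) then p.1 + 1 else 1
  (cnt, if p.2 < cnt then cnt else p.2)

def check (x : List (List String)) (n : Int) : Int :=
  (PySem.List.pyRange 0 n 1).foldl (fun result i =>
    let r1 := ((PySem.List.pyRange 1 n 1).foldl (rowStepA (fun j => cellGet x i j)) (1, result)).2
    ((PySem.List.pyRange 1 n 1).foldl (rowStepA (fun j => cellGet x j i)) (1, r1)).2) 1

-- ===== PORT B =====
-- one step of B's `for j in range(1, n)` row scan (row_run, result)
def rowStepB (f : Int → String) (p : Int × Int) (j : Int) : Int × Int :=
  let row_run := if f j = f (j - 1) then p.1 + 1 else 1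
  (row_run, if row_run > p.2 then row_run else p.2)

-- `if v > result: result = v`
def maxStep (r v : Int) : Int := if v > r then v else r

def check_alt (x : List (List String)) (n : Int) : Int :=
  ((PySem.List.pyRange 0 n 1).foldl (fun (s : Int × List Int) i =>
      let s :=
        if i > 0 then
          let col_run := (PySem.List.pyRange 0 n 1).map (fun j =>
            if cellGet x i j = cellGet x (i - 1) j then PySem.List.pyGetD s.2 j 0 + 1 else 1)
          (col_run.foldl maxStep s.1, col_run)
        else s
      (((PySem.List.pyRange 1 n 1).foldl (rowStepB (fun j => cellGet x i j)) (1, s.1)).2, s.2))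
    (1, List.replicate n.toNat 1)).1

-- ===== PRECONDITION & SPEC =====
-- Pre_check holds exactly where the Python A returns: for n ≥ 2 both programs index
-- x[i][j] for all i, j < n, so A raises IndexError unless x has ≥ n rows whose first
-- n each have length ≥ n; for n ≤ 1 neither program indexes anything.
def Pre_check (x : List (List String)) (n : Int) : Prop :=
  2 ≤ n → ((n ≤ (x.length : Int)) ∧ ∀ row ∈ x.take n.toNat, n ≤ (row.length : Int))
instance (x : List (List String)) (n : Int) : Decidable (Pre_check x n) := by
  unfold Pre_check; infer_instance

def pvWitness_check : List (List String) × Int := ([["a", "a"], ["b", "a"]], 2)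

def Spec_check (x : List (List String)) (n : Int) (out : Int) : Prop := out = check_alt x n
instance (x : List (List String)) (n : Int) (out : Int) : Decidable (Spec_check x n out) := by
  unfold Spec_check; infer_instance

-- ===== CLAIM (what is proved, stated in full; the proofs are below) =====
def Claim_equal_check : Prop := ∀ (x : List (List String)) (n : Int), Dom_check x n → Pre_check x n → Spec_check x n (check x n)

-- ===== LEMMAS AND PROOFS =====

-- run length of equal adjacent values of f ending at index k
def gC (f : Int → String) : Nat → Int
  | 0 => 1
  | k + 1 => if f ((k : Int) + 1) = f (k : Int) then gC f k + 1 else 1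

-- running maximum of f 0, …, f (k-1) with base 1
def L (f : Nat → Int) : Nat → Int
  | 0 => 1
  | k + 1 => max (L f k) (f k)

-- vertical run length in column j ending at row r
def vR (x : List (List String)) (j : Int) (r : Nat) : Int := gC (fun r' => cellGet x r' j) r

-- best horizontal run in row i of an (m+1)-wide grid
def RB (x : List (List String)) (m : Nat) (i : Int) : Int :=
  L (fun j => gC (fun j' => cellGet x i j') (j + 1)) m

-- best vertical run in column i (A's view)
def CB (x : List (List String)) (m : Nat) (i : Int) : Int :=
  L (fun j => vR x i (j + 1)) m

-- best vertical run ending at row i over all columns (B's view)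
def cv (x : List (List String)) (m : Nat) (i : Nat) : Int :=
  L (fun j => vR x (j : Int) i) (m + 1)

lemma one_le_L (f : Nat → Int) (k : Nat) : 1 ≤ L f k := by
  induction k with
  | zero => exact le_refl 1
  | succ k ih => exact le_trans ih (le_max_left _ _)

lemma maxIf (a b : Int) : (if a < b then b else a) = max a b := by
  rcases lt_or_ge a b with h | h
  · simp [h, max_eq_right h.le]
  · simp [not_lt.2 h, max_eq_left h]

lemma L_congr (f g : Nat → Int) (k : Nat) (h : ∀ i, i < k → f i = g i) : L f k = L g k := by
  induction k with
  | zero => rfl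
  | succ k ih =>
    simp only [L, ih (fun i hi => h i (Nat.lt_succ_of_lt hi)), h k (Nat.lt_succ_self k)]

lemma L_one (k : Nat) : L (fun _ => 1) k = 1 := by
  induction k with
  | zero => rfl
  | succ k ih => simp [L, ih]

lemma L_max (f g : Nat → Int) (k : Nat) :
    L (fun i => max (f i) (g i)) k = max (L f k) (L g k) := by
  induction k with
  | zero => rfl
  | succ k ih =>
    simp only [L, ih]
    rw [max_max_max_comm]

lemma L_swap (h : Nat → Nat → Int) (a b : Nat) :
    L (fun i => L (fun j => h i j) a) b = L (fun j => L (fun i => h i j) b) a := by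
  induction b with
  | zero => exact (L_one a).symm
  | succ b ih =>
    show max (L (fun i => L (fun j => h i j) a) b) (L (fun j => h b j) a) = _
    rw [ih, ← L_max]
    exact L_congr _ _ a (fun j _ => rfl)

lemma L_shift (f : Nat → Int) (hf : f 0 = 1) (k : Nat) :
    L f (k + 1) = L (fun i => f (i + 1)) k := by
  induction k with
  | zero => simp [L, hf]
  | succ k ih => simp only [L] at ih ⊢; rw [ih]

-- A's inner scan, characterized
lemma scanA (f : Int → String) (r : Int) (hr : 1 ≤ r) (m : Nat) :
    (PySem.List.pyRange 1 ((m : Int) + 1) 1).foldl (rowStepA f) (1, r)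
      = (gC f m, max r (L (fun j => gC f (j + 1)) m)) := by
  induction m with
  | zero =>
    rw [PySem.List.pyRange_one_eq_nil (by omega)]
    simp [gC, L, max_eq_left hr]
  | succ m ih =>
    have hsplit : PySem.List.pyRange 1 ((m : Int) + 1 + 1) 1
        = PySem.List.pyRange 1 ((m : Int) + 1) 1 ++ [(m : Int) + 1] :=
      PySem.List.pyRange_one_succ_right (by omega)
    push_cast
    rw [hsplit, List.foldl_append, ih]
    simp only [List.foldl, rowStepA]
    have h1 : (m : Int) + 1 - 1 = (m : Int) := by ring
    rw [h1]
    have h2 : gC f (m + 1) = if f ((m : Int) + 1) = f (m : Int) then gC f m + 1 else 1 := rfl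
    rw [← h2]
    simp only [L, maxIf, max_assoc]

lemma stepBA (f : Int → String) : rowStepB f = rowStepA f := by
  funext p j
  simp only [rowStepB, rowStepA, gt_iff_lt]

lemma foldl_max_map (g : Int → Int) (n' : Nat) (r : Int) (hr : 1 ≤ r) :
    (((PySem.List.pyRange 0 (n' : Int) 1).map g).foldl maxStep r)
      = max r (L (fun j => g (j : Int)) n') := by
  induction n' generalizing r with
  | zero =>
    rw [PySem.List.pyRange_one_eq_nil (by omega)]
    simp [L, max_eq_left hr]
  | succ n' ih =>
    have hsplit : PySem.List.pyRange 0 ((n' : Int) + 1) 1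
        = PySem.List.pyRange 0 (n' : Int) 1 ++ [(n' : Int)] :=
      PySem.List.pyRange_one_succ_right (by omega)
    push_cast
    rw [hsplit, List.map_append, List.foldl_append, ih r hr]
    simp only [List.map, List.foldl, maxStep, L]
    rw [show ∀ a b : Int, (if b > a then b else a) = max a b from fun a b => maxIf a b,
      max_assoc]

-- B's column state after processing k rows: col_run[j] = vR x j (k-1)
def clS (x : List (List String)) (n : Int) (k : Nat) : List Int :=
  (PySem.List.pyRange 0 n 1).map (fun j => vR x j (k - 1))

lemma clS_zero (x : List (List String)) (n : Int) :
    clS x n 0 = List.replicate n.toNat 1 := by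
  unfold clS
  have : ∀ j : Int, vR x j (0 - 1) = 1 := fun j => rfl
  simp only [this, List.map_const']
  rw [PySem.List.length_pyRange_one]
  norm_num

-- A's whole computation
lemma A_aux (x : List (List String)) (m : Nat) (k : Nat) :
    (PySem.List.pyRange 0 (k : Int) 1).foldl (fun result i =>
      let r1 := ((PySem.List.pyRange 1 ((m : Int) + 1) 1).foldl (rowStepA (fun j => cellGet x i j)) (1, result)).2
      ((PySem.List.pyRange 1 ((m : Int) + 1) 1).foldl (rowStepA (fun j => cellGet x j i)) (1, r1)).2) 1
    = L (fun i => max (RB x m (i : Int)) (CB x m (i : Int))) k := by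
  induction k with
  | zero =>
    rw [show PySem.List.pyRange 0 ((0:Nat):Int) 1 = [] from PySem.List.pyRange_one_eq_nil (by omega)]
    rfl
  | succ k ih =>
    have hsplit : PySem.List.pyRange 0 ((k : Int) + 1) 1
        = PySem.List.pyRange 0 (k : Int) 1 ++ [(k : Int)] :=
      PySem.List.pyRange_one_succ_right (by omega)
    push_cast
    rw [hsplit, List.foldl_append, ih]
    simp only [List.foldl]
    rw [scanA _ _ (one_le_L _ _) m]
    rw [scanA _ _ (le_max_of_le_right (one_le_L _ _)) m]
    simp only [L, RB, CB, vR, max_assoc]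

lemma B_aux (x : List (List String)) (m : Nat) (k : Nat) :
    (PySem.List.pyRange 0 (k : Int) 1).foldl (fun (s : Int × List Int) i =>
      let s :=
        if i > 0 then
          let col_run := (PySem.List.pyRange 0 ((m : Int) + 1) 1).map (fun j =>
            if cellGet x i j = cellGet x (i - 1) j then PySem.List.pyGetD s.2 j 0 + 1 else 1)
          (col_run.foldl maxStep s.1, col_run)
        else s
      (((PySem.List.pyRange 1 ((m : Int) + 1) 1).foldl (rowStepB (fun j => cellGet x i j)) (1, s.1)).2, s.2))
      (1, clS x ((m : Int) + 1) 0)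
    = (L (fun i => max (cv x m i) (RB x m (i : Int))) k, clS x ((m : Int) + 1) k) := by
  induction k with
  | zero =>
    rw [show PySem.List.pyRange 0 ((0:Nat):Int) 1 = [] from PySem.List.pyRange_one_eq_nil (by omega)]
    rfl
  | succ k ih =>
    have hsplit : PySem.List.pyRange 0 ((k : Int) + 1) 1
        = PySem.List.pyRange 0 (k : Int) 1 ++ [(k : Int)] :=
      PySem.List.pyRange_one_succ_right (by omega)
    push_cast
    rw [hsplit, List.foldl_append, ih]
    simp only [List.foldl, stepBA]
    rcases Nat.eq_zero_or_pos k with hk | hk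
    · subst hk
      simp only [Nat.cast_zero, gt_iff_lt, lt_self_iff_false, if_false]
      rw [scanA _ _ (one_le_L _ _) m]
      have hcv0 : cv x m 0 = 1 := L_one (m + 1)
      refine Prod.ext ?_ ?_
      · show max (L (fun i => max (cv x m i) (RB x m (i : Int))) 0)
            (L (fun j => gC (fun j' => cellGet x ((0:Nat) : Int) j') (j + 1)) m) = _
        simp only [L, hcv0, RB, Nat.cast_zero]
        rw [← max_assoc, max_self]
      · rfl
    · rw [if_pos (by exact_mod_cast hk)]
      have hmap : (List.map
            (fun j => if cellGet x (k : Int) j = cellGet x ((k : Int) - 1) j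
              then PySem.List.pyGetD (clS x ((m : Int) + 1) k) j 0 + 1 else 1)
            (PySem.List.pyRange 0 ((m : Int) + 1) 1)) = clS x ((m : Int) + 1) (k + 1) := by
        unfold clS
        apply List.map_congr_left
        intro j hj
        obtain ⟨hj0, hjn⟩ := PySem.List.mem_pyRange_one.mp hj
        rw [PySem.List.pyGetD_map_pyRange_of_nonneg _ _ _ _ hj0 hjn]
        have hk1 : (k : Int) = ((k - 1 : Nat) : Int) + 1 := by omega
        rw [show k + 1 - 1 = (k - 1) + 1 from by omega, hk1, add_sub_cancel_right]
        rfl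
      rw [hmap]
      have hfold : (clS x ((m : Int) + 1) (k + 1)).foldl maxStep
            (L (fun i => max (cv x m i) (RB x m (i : Int))) k)
          = max (L (fun i => max (cv x m i) (RB x m (i : Int))) k) (cv x m k) := by
        unfold clS
        rw [show ((m : Int) + 1) = (((m + 1 : Nat)) : Int) from by push_cast; ring]
        rw [foldl_max_map _ _ _ (one_le_L _ _)]
        rfl
      rw [hfold, scanA _ _ (le_max_of_le_left (one_le_L _ _)) m]
      refine Prod.ext ?_ ?_
      · show max (max (L (fun i => max (cv x m i) (RB x m (i : Int))) k) (cv x m k))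
            (L (fun j => gC (fun j' => cellGet x (k : Int) j') (j + 1)) m) = _
        simp only [L, RB, max_assoc]
      · rfl

lemma bridge (x : List (List String)) (m : Nat) :
    L (fun i => max (RB x m (i : Int)) (CB x m (i : Int))) (m + 1)
      = L (fun i => max (cv x m i) (RB x m (i : Int))) (m + 1) := by
  rw [L_max, L_max, max_comm]
  congr 1
  calc L (fun i => CB x m (i : Int)) (m + 1)
      = L (fun j => L (fun i => vR x (j : Int) i) (m + 1)) (m + 1) :=
        L_congr _ _ (m + 1) (fun j _ => (L_shift _ rfl m).symm)
    _ = L (fun i => L (fun j => vR x (j : Int) i) (m + 1)) (m + 1) :=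
        (L_swap (fun i j => vR x (j : Int) i) (m + 1) (m + 1)).symm
    _ = L (fun i => cv x m i) (m + 1) := rfl

-- ===== VERDICT (by name: the statement is the Claim_ definition above) =====
theorem check_spec : Claim_equal_check := by
  intro x n _ _
  unfold Spec_check
  by_cases hn : n ≤ 0
  · unfold check check_alt
    rw [show PySem.List.pyRange 0 n 1 = [] from PySem.List.pyRange_one_eq_nil hn]
    rfl
  · obtain ⟨m, rfl⟩ : ∃ m : Nat, n = (m : Int) + 1 := ⟨(n - 1).toNat, by omega⟩

    have hcast : ((m + 1 : Nat) : Int) = (m : Int) + 1 := by push_cast; ring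
    have ha := A_aux x m (m + 1)
    have hb := B_aux x m (m + 1)
    rw [hcast] at ha hb
    unfold check check_alt
    rw [ha, ← clS_zero, hb]
    exact bridge x m
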